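-- pv_equiv track=rewrite | github.com/davidercool/Vef2Lokaverkefni | Scripts/resources.py | indexOfNth
-- ===== SOURCE A (Python) =====
-- def indexOfNth(container, elem = " ", nth = 1):
--     if nth == 0:
--         return 0
--     occ = 0
--     for i, x in enumerate(container):
--         if container[i:len(elem)+i] == elem:
--             occ += 1
--         if occ == nth:
--             return i
--     if occ < nth:
--         return len(container)
-- ===== SOURCE B (Python) =====
-- def indexOfNth(container, elem = " ", nth = 1):
--     if nth == 0:
--         return 0
--     occ = 0
--     start = 0
--     while start <= len(container):
--         i = container.find(elem, start)
--         if i < 0: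
--             break
--         occ += 1
--         if occ == nth:
--             return i
--         start = i + 1
--     return len(container)
-- ===== Notes on version B (the rewrite author's own statement) =====
-- stated objective: faster
-- what changed: B replaces A's per-index slice comparison (compare container[i:i+len(elem)] at every index i) by a loop of container.find(elem, start) calls that jump directly from one match to the next, counting overlapping matches in order.
-- outside the precondition, e.g. on indexOfNth('ab', 'a', -1): A returns None, B returns 2
import Mathlib
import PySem

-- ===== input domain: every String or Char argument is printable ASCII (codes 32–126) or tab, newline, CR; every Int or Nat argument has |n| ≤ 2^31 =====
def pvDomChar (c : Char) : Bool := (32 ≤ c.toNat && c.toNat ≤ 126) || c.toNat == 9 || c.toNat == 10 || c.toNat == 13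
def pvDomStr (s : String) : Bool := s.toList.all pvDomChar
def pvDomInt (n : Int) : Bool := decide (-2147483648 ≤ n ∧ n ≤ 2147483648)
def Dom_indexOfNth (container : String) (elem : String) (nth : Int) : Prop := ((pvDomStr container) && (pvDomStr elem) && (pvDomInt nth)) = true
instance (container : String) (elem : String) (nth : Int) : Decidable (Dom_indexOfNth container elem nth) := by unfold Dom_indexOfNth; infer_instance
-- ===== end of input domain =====

-- B replaces A's index-by-index slice comparison by a str.find jump loop between matches; return-value equivalence proved for nth >= 0 (A returns None for nth < 0).


-- ===== PORT A =====
-- A's loop 'for i, x in enumerate(container): …', carrying occ; on loop exhaustion with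
-- occ ≥ nth Python A returns None (no Int); that case is outside Pre_ and ported as 0.
def pvAGo (c e : List Char) (nth : Int) : List (Int × Char) → Int → Int
  | [], occ => if occ < nth then (c.length : Int) else 0
  | (i, _x) :: rest, occ =>
      let occ' := if PySem.List.slice c (some i) (some ((e.length : Int) + i)) = e then occ + 1 else occ
      if occ' = nth then i else pvAGo c e nth rest occ'

def indexOfNth (container : String) (elem : String) (nth : Int) : Int :=
  if nth = 0 then 0
  else pvAGo container.toList elem.toList nth (PySem.List.enumerate container.toList 0) 0

-- ===== PORT B =====
-- B's 'while start <= len(container)' loop around container.find(elem, start); the fuel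
-- argument (called with length+1) only bounds the loop: start strictly increases each
-- iteration, so the guard 'start <= len' fails before the fuel can run out.
def pvBGo (c e : List Char) (nth : Int) : Nat → Int → Nat → Int
  | 0, _occ, _start => (c.length : Int)
  | fuel + 1, occ, start =>
    if start ≤ c.length then
      if PySem.Chars.findFrom c e (start : Int) none < 0 then (c.length : Int)
      else if occ + 1 = nth then PySem.Chars.findFrom c e (start : Int) none
      else pvBGo c e nth fuel (occ + 1) ((PySem.Chars.findFrom c e (start : Int) none).toNat + 1)
    else (c.length : Int)

def indexOfNth_alt (container : String) (elem : String) (nth : Int) : Int :=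
  if nth = 0 then 0
  else pvBGo container.toList elem.toList nth (container.toList.length + 1) 0 0

-- ===== PRECONDITION & SPEC =====
-- Pre_ excludes nth < 0, on which Python A falls off the end of the function and returns None (not an int).
def Pre_indexOfNth (container : String) (elem : String) (nth : Int) : Prop := 0 ≤ nth
instance (container : String) (elem : String) (nth : Int) : Decidable (Pre_indexOfNth container elem nth) := by unfold Pre_indexOfNth; infer_instance
def pvWitness_indexOfNth : String × String × Int := ("abcab", "ab", 2)
def Spec_indexOfNth (container : String) (elem : String) (nth : Int) (out : Int) : Prop := out = indexOfNth_alt container elem nth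
instance (container : String) (elem : String) (nth : Int) (out : Int) : Decidable (Spec_indexOfNth container elem nth out) := by unfold Spec_indexOfNth; infer_instance

-- ===== CLAIM (what is proved, stated in full; the proofs are below) =====
def Claim_equal_indexOfNth : Prop := ∀ (container : String) (elem : String) (nth : Int), Dom_indexOfNth container elem nth → Pre_indexOfNth container elem nth → Spec_indexOfNth container elem nth (indexOfNth container elem nth)

-- ===== LEMMAS AND PROOFS =====

-- A's slice test at index k is 'elem is a prefix of the k-th suffix'
lemma pvCond_iff (c e : List Char) (k : Nat) :
    (PySem.List.slice c (some (k : Int)) (some ((e.length : Int) + (k : Int))) = e) ↔ e <+: c.drop k := by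
  rw [add_comm ((e.length : Int)) ((k : Int)), PySem.List.slice_natCast_add]
  constructor
  · intro h; rw [← h]; exact List.take_prefix _ _
  · intro h
    exact ((List.prefix_iff_eq_take).mp h).symm

-- find(elem, k) returns k itself when elem matches at k
lemma pvFindFrom_self (c e : List Char) (k : Nat) (hk : k ≤ c.length) (h : e <+: c.drop k) :
    PySem.Chars.findFrom c e (k : Int) none = (k : Int) := by
  have hne : PySem.Chars.findFrom c e (k : Int) none ≠ -1 :=
    fun hEq => ((PySem.Chars.findFrom_natCast_eq_neg_one_iff c e k hk).mp hEq) h.isInfix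
  have hsp := PySem.Chars.findFrom_natCast_spec c e k hk hne
  have h1 : (k : Int) ≤ PySem.Chars.findFrom c e (k : Int) none := hsp.1
  have h3 := hsp.2.2
  by_contra hneq
  have hlt : k < (PySem.Chars.findFrom c e (k : Int) none).toNat := by omega
  exact h3 k le_rfl hlt h

-- no match at k (k < len): find(elem, k) = find(elem, k+1)
lemma pvFindFrom_succ (c e : List Char) (k : Nat) (hk : k < c.length) (h : ¬ e <+: c.drop k) :
    PySem.Chars.findFrom c e (k : Int) none = PySem.Chars.findFrom c e ((k + 1 : Nat) : Int) none := by
  have hk1 : k + 1 ≤ c.length := hk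
  have hinf : ∀ j, e <+: c.drop j → k ≤ j → k + 1 ≤ j := by
    intro j hj hkj
    rcases Nat.lt_or_ge k j with h' | h'
    · omega
    · exfalso; apply h
      have hjk : j = k := Nat.le_antisymm h' hkj
      rw [← hjk]; exact hj
  by_cases hn2 : PySem.Chars.findFrom c e ((k + 1 : Nat) : Int) none = -1
  · rw [hn2, PySem.Chars.findFrom_natCast_eq_neg_one_iff c e k hk.le]
    rw [PySem.Chars.findFrom_natCast_eq_neg_one_iff c e (k+1) hk1] at hn2
    intro hinfix
    apply hn2
    have hex : ∃ j, e <+: (c.drop k).drop j :=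
      (PySem.Chars.exists_prefix_drop_iff_isIn e (c.drop k)).mpr
        ((PySem.Chars.isIn_iff_infix e (c.drop k)).mpr hinfix)
    obtain ⟨j, hj⟩ := hex
    have e1 : (c.drop k).drop j = c.drop (k + j) := by rw [List.drop_drop]
    rw [e1] at hj
    have hge : k + 1 ≤ k + j := hinf _ hj (by omega)
    have e2 : (c.drop (k + 1)).drop (k + j - (k + 1)) = c.drop (k + j) := by
      rw [List.drop_drop]; congr 1; omega
    exact (PySem.Chars.isIn_iff_infix e (c.drop (k + 1))).mp
      ((PySem.Chars.exists_prefix_drop_iff_isIn e (c.drop (k + 1))).mp ⟨_, by rw [e2]; exact hj⟩)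
  · have hn1 : PySem.Chars.findFrom c e (k : Int) none ≠ -1 := by
      intro hEq
      have hni := (PySem.Chars.findFrom_natCast_eq_neg_one_iff c e k hk.le).mp hEq
      apply hni
      have hinfix2 : e <:+: c.drop (k + 1) := by
        by_contra hni2
        exact hn2 ((PySem.Chars.findFrom_natCast_eq_neg_one_iff c e (k+1) hk1).mpr hni2)
      have e3 : (c.drop k).drop 1 = c.drop (k + 1) := by rw [List.drop_drop]
      have hsuf : c.drop (k + 1) <:+ c.drop k := e3 ▸ List.drop_suffix 1 (c.drop k)
      exact hinfix2.trans hsuf.isInfix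
    have sp1 := PySem.Chars.findFrom_natCast_spec c e k hk.le hn1
    have sp2 := PySem.Chars.findFrom_natCast_spec c e (k+1) hk1 hn2
    set i1 := PySem.Chars.findFrom c e (k : Int) none with hi1
    set i2 := PySem.Chars.findFrom c e ((k + 1 : Nat) : Int) none with hi2
    have h1k : (k : Int) ≤ i1 := sp1.1
    have h2k : ((k + 1 : Nat) : Int) ≤ i2 := sp2.1
    have h1p : e <+: c.drop i1.toNat := sp1.2.1
    have h2p : e <+: c.drop i2.toNat := sp2.2.1
    have hk1le : k + 1 ≤ i1.toNat := hinf _ h1p (by omega)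
    have hle1 : i2.toNat ≤ i1.toNat := by
      by_contra hc
      exact sp2.2.2 i1.toNat hk1le (by omega) h1p
    have hle2 : i1.toNat ≤ i2.toNat := by
      by_contra hc
      exact sp1.2.2 i2.toNat (by omega) (by omega) h2p
    omega

-- pvBGo never enters the loop body once start is past the length
lemma pvBGo_oor (c e : List Char) (nth : Int) :
    ∀ f occ start, c.length < start → pvBGo c e nth f occ start = (c.length : Int) := by
  intro f occ start hlt
  cases f with
  | zero => rfl
  | succ a => rw [pvBGo, if_neg (by omega)]

-- the result does not depend on the fuel once it covers the remaining loop iterations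
lemma pvBGo_fuel (c e : List Char) (nth : Int) :
    ∀ f1 f2 occ start, c.length + 1 - start ≤ f1 → c.length + 1 - start ≤ f2 →
      pvBGo c e nth f1 occ start = pvBGo c e nth f2 occ start := by
  intro f1
  induction f1 with
  | zero =>
    intro f2 occ start h1 h2
    rw [pvBGo_oor c e nth 0 occ start (by omega), pvBGo_oor c e nth f2 occ start (by omega)]
  | succ a ih =>
    intro f2 occ start h1 h2
    by_cases hs : start ≤ c.length
    · cases f2 with
      | zero =>
        rw [pvBGo_oor c e nth (a + 1) occ start (by omega)]
        rfl
      | succ b =>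
        rw [pvBGo, pvBGo, if_pos hs, if_pos hs]
        by_cases hneg : PySem.Chars.findFrom c e (start : Int) none < 0
        · rw [if_pos hneg, if_pos hneg]
        · rw [if_neg hneg, if_neg hneg]
          by_cases hn : occ + 1 = nth
          · rw [if_pos hn, if_pos hn]
          · rw [if_neg hn, if_neg hn]
            have hne : PySem.Chars.findFrom c e (start : Int) none ≠ -1 := by
              intro h; rw [h] at hneg; exact hneg (by norm_num)
            have hsp := PySem.Chars.findFrom_natCast_spec c e start hs hne
            have hk : (start : Int) ≤ PySem.Chars.findFrom c e (start : Int) none := hsp.1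
            exact ih b (occ + 1) ((PySem.Chars.findFrom c e (start : Int) none).toNat + 1)
              (by omega) (by omega)
    · rw [pvBGo_oor c e nth (a + 1) occ start (by omega),
          pvBGo_oor c e nth f2 occ start (by omega)]

-- main bridge: from any position k, A's remaining scan equals B's remaining find loop
lemma pvMain (c e : List Char) (nth : Int) :
    ∀ d k occ f, k ≤ c.length → c.length - k = d → occ < nth → c.length + 1 - k ≤ f →
      pvAGo c e nth (PySem.List.enumerate (c.drop k) (k : Int)) occ = pvBGo c e nth f occ k := by
  intro d
  induction d with
  | zero =>
    intro k occ f hk hd hocc hf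
    have hkn : k = c.length := by omega
    subst hkn
    obtain ⟨a, rfl⟩ : ∃ a, f = a + 1 := ⟨f - 1, by omega⟩
    rw [List.drop_length, PySem.List.enumerate_nil]
    rw [pvBGo]
    simp only [pvAGo, if_pos hocc, if_pos (le_refl c.length)]
    by_cases he : e = []
    · subst he
      have hself := pvFindFrom_self c [] c.length le_rfl (by simp)
      rw [hself]
      rw [if_neg (by omega : ¬ ((c.length : Int) < 0))]
      by_cases hn : occ + 1 = nth
      · rw [if_pos hn]
      · rw [if_neg hn, Int.toNat_natCast, pvBGo_oor c [] nth a (occ + 1) (c.length + 1) (by omega)]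
    · have hne : PySem.Chars.findFrom c e ((c.length : Nat) : Int) none = -1 := by
        rw [PySem.Chars.findFrom_natCast_eq_neg_one_iff c e c.length le_rfl]
        rw [List.drop_length]
        intro hinf
        exact he (List.infix_nil.mp hinf)
      rw [hne, if_pos (by norm_num)]
  | succ d ih =>
    intro k occ f hk hd hocc hf
    have hklt : k < c.length := by omega
    obtain ⟨a, rfl⟩ : ∃ a, f = a + 1 := ⟨f - 1, by omega⟩
    rw [List.drop_eq_getElem_cons hklt, PySem.List.enumerate_cons]
    have hcast : (k : Int) + 1 = ((k + 1 : Nat) : Int) := by push_cast; ring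
    rw [pvBGo, if_pos hklt.le]
    by_cases hm : e <+: c.drop k
    · have hcond := (pvCond_iff c e k).mpr hm
      have hself := pvFindFrom_self c e k hklt.le hm
      simp only [pvAGo, if_pos hcond]
      rw [hself, if_neg (by omega : ¬ ((k : Int) < 0))]
      by_cases hn : occ + 1 = nth
      · rw [if_pos hn, if_pos hn]
      · rw [if_neg hn, if_neg hn, hcast, Int.toNat_natCast]
        exact ih (k + 1) (occ + 1) a (by omega) (by omega) (by omega) (by omega)
    · have hcond : ¬ (PySem.List.slice c (some (k : Int)) (some ((e.length : Int) + (k : Int))) = e) :=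
        fun hc => hm ((pvCond_iff c e k).mp hc)
      simp only [pvAGo, if_neg hcond, if_neg (by omega : ¬ occ = nth)]
      rw [hcast, ih (k + 1) occ a (by omega) (by omega) hocc (by omega)]
      rw [pvFindFrom_succ c e k hklt hm]
      obtain ⟨b, rfl⟩ : ∃ b, a = b + 1 := ⟨a - 1, by omega⟩
      conv_lhs => rw [pvBGo]
      rw [if_pos (by omega : k + 1 ≤ c.length)]
      by_cases hneg : PySem.Chars.findFrom c e ((k + 1 : Nat) : Int) none < 0
      · rw [if_pos hneg, if_pos hneg]
      · rw [if_neg hneg, if_neg hneg]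
        by_cases hn : occ + 1 = nth
        · rw [if_pos hn, if_pos hn]
        · rw [if_neg hn, if_neg hn]
          have hne2 : PySem.Chars.findFrom c e ((k + 1 : Nat) : Int) none ≠ -1 := by
            intro h; rw [h] at hneg; exact hneg (by norm_num)
          have hsp := PySem.Chars.findFrom_natCast_spec c e (k + 1) (by omega) hne2
          have hik : ((k + 1 : Nat) : Int) ≤ PySem.Chars.findFrom c e ((k + 1 : Nat) : Int) none := hsp.1
          exact pvBGo_fuel c e nth b (b + 1) (occ + 1)
            ((PySem.Chars.findFrom c e ((k + 1 : Nat) : Int) none).toNat + 1) (by omega) (by omega)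

-- ===== VERDICT (by name: the statement is the Claim_ definition above) =====
theorem indexOfNth_spec : Claim_equal_indexOfNth := by
  intro container elem nth _hdom hpre
  unfold Spec_indexOfNth indexOfNth indexOfNth_alt
  by_cases h0 : nth = 0
  · rw [if_pos h0, if_pos h0]
  · rw [if_neg h0, if_neg h0]
    have hpos : (0 : Int) < nth := lt_of_le_of_ne hpre (Ne.symm h0)
    have := pvMain container.toList elem.toList nth container.toList.length 0 0
      (container.toList.length + 1) (by omega) (by omega) hpos (by omega)
    simpa using this
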